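-- pv_equiv track=rewrite | github.com/NiallMcguire/EEG-NLP | src/data.py | is_named_entity_in_sentences
-- ===== SOURCE A (Python) =====
-- def is_named_entity_in_sentences(named_entity, sentences, embeddings):
--
--     named_entity_eeg_list = []
--     for sentence_index in range(len(sentences)):
--         sentence = sentences[sentence_index]
--         for i in range(len(sentence) - len(named_entity) + 1):
--             if sentence[i:i + len(named_entity)] == named_entity:
--                 named_entity_eeg = embeddings[sentence_index][i:i + len(named_entity)]
--                 if named_entity_eeg != [] and len(named_entity_eeg) == len(named_entity):
--                     named_entity_eeg_list.append(named_entity_eeg)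
--
--     return named_entity_eeg_list
-- ===== SOURCE B (Python) =====
-- def is_named_entity_in_sentences(named_entity, sentences, embeddings):
--     n = len(named_entity)
--     if n == 0:
--         return []
--     out = []
--     for sent, emb in zip(sentences, embeddings):
--         # candidate start positions, pruned one pattern token at a time
--         positions = list(range(len(sent) - n + 1))
--         for j, tok in enumerate(named_entity):
--             positions = [p for p in positions if sent[p + j] == tok]
--         for p in positions:
--             if p + n <= len(emb):
--                 out.append(emb[p:p + n])
--     return out
-- ===== Notes on version B (the rewrite author's own statement) =====
-- stated objective: alternative
-- what changed: B swaps the loop order: instead of comparing a full slice at every window position, it keeps a per-sentence candidate-position list and narrows it one pattern token at a time (iterating over zip(sentences, embeddings) rather than indices), then emits the embedding windows of the surviving positions.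
import Mathlib
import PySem

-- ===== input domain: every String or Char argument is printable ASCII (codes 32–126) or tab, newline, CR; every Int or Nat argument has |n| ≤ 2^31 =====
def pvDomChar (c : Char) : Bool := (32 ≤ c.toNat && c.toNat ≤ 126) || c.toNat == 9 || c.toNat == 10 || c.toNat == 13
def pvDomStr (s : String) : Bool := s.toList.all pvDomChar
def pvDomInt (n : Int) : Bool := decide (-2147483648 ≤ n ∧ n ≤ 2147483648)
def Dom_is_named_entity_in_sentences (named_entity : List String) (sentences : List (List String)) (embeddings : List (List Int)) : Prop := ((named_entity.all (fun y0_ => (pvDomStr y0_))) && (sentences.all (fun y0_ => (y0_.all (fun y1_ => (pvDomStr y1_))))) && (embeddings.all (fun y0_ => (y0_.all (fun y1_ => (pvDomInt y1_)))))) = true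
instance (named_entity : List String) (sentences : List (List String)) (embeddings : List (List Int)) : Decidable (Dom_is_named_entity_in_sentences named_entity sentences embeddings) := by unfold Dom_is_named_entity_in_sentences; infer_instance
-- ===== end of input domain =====

-- B replaces A's per-position slice comparison by a candidate-position list pruned one pattern
-- token at a time over zip(sentences, embeddings) (objective: alternative, same worst-case cost).

-- ===== PORT A =====
-- embeddings[sentence_index] raises IndexError when sentence_index ≥ len(embeddings); Pre_ excludes
-- exactly those inputs, so the default [] of pyGetD is never the value being claimed.
def is_named_entity_in_sentences (named_entity : List String) (sentences : List (List String)) (embeddings : List (List Int)) : List (List Int) :=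
  (PySem.List.pyRange 0 (sentences.length : Int) 1).foldl (fun acc si =>
    let sentence := PySem.List.pyGetD sentences si []
    (PySem.List.pyRange 0 ((sentence.length : Int) - (named_entity.length : Int) + 1) 1).foldl (fun acc2 i =>
      if PySem.List.slice sentence (some i) (some (i + (named_entity.length : Int))) == named_entity then
        let eeg := PySem.List.slice (PySem.List.pyGetD embeddings si []) (some i) (some (i + (named_entity.length : Int)))
        if (!(eeg == [])) && (eeg.length == named_entity.length) then acc2 ++ [eeg] else acc2
      else acc2) acc) []

-- ===== PORT B =====
-- sent[p + j] is always in range for a surviving candidate p (p + j < len(sent) by construction),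
-- so pyGetD with a dummy default is exact here.
def is_named_entity_in_sentences_alt (named_entity : List String) (sentences : List (List String)) (embeddings : List (List Int)) : List (List Int) :=
  if named_entity.length == 0 then []
  else (sentences.zip embeddings).foldl (fun out se =>
    let sent := se.1
    let emb := se.2
    let positions :=
      (PySem.List.enumerate named_entity 0).foldl
        (fun ps jt => ps.filter (fun p => PySem.List.pyGetD sent (p + jt.1) "" == jt.2))
        (PySem.List.pyRange 0 ((sent.length : Int) - (named_entity.length : Int) + 1) 1)
    positions.foldl (fun o p =>
      if p + (named_entity.length : Int) ≤ (emb.length : Int) then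
        o ++ [PySem.List.slice emb (some p) (some (p + (named_entity.length : Int)))]
      else o) out) []

-- ===== PRECONDITION & SPEC =====
-- Pre_ excludes exactly the inputs on which A raises IndexError: a sentence with no embedding row
-- (index ≥ len(embeddings)) in which the named entity occurs (an empty entity occurs everywhere).
def Pre_is_named_entity_in_sentences (named_entity : List String) (sentences : List (List String)) (embeddings : List (List Int)) : Prop :=
  ∀ s ∈ sentences.drop embeddings.length, ¬ (named_entity <:+: s)
instance (named_entity : List String) (sentences : List (List String)) (embeddings : List (List Int)) : Decidable (Pre_is_named_entity_in_sentences named_entity sentences embeddings) := by unfold Pre_is_named_entity_in_sentences; infer_instance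
def pvWitness_is_named_entity_in_sentences : List String × List (List String) × List (List Int) :=
  (["a"], [["a", "b"], ["c"]], [[1, 2], [3]])

def Spec_is_named_entity_in_sentences (named_entity : List String) (sentences : List (List String)) (embeddings : List (List Int)) (out : List (List Int)) : Prop := out = is_named_entity_in_sentences_alt named_entity sentences embeddings
instance (named_entity : List String) (sentences : List (List String)) (embeddings : List (List Int)) (out : List (List Int)) : Decidable (Spec_is_named_entity_in_sentences named_entity sentences embeddings out) := by unfold Spec_is_named_entity_in_sentences; infer_instance

-- ===== CLAIM (what is proved, stated in full; the proofs are below) =====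
def Claim_equal_is_named_entity_in_sentences : Prop := ∀ (named_entity : List String) (sentences : List (List String)) (embeddings : List (List Int)), Dom_is_named_entity_in_sentences named_entity sentences embeddings → Pre_is_named_entity_in_sentences named_entity sentences embeddings → Spec_is_named_entity_in_sentences named_entity sentences embeddings (is_named_entity_in_sentences named_entity sentences embeddings)
-- ===== LEMMAS AND PROOFS =====

-- A's per-sentence contribution, in filter/map form.
def pvBlockA (ne s : List String) (e : List Int) : List (List Int) :=
  ((PySem.List.pyRange 0 ((s.length : Int) - (ne.length : Int) + 1) 1).filter (fun i =>
      (PySem.List.slice s (some i) (some (i + (ne.length : Int))) == ne) &&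
      ((!(PySem.List.slice e (some i) (some (i + (ne.length : Int))) == [])) &&
        ((PySem.List.slice e (some i) (some (i + (ne.length : Int)))).length == ne.length)))).map
    (fun i => PySem.List.slice e (some i) (some (i + (ne.length : Int))))

-- B's per-sentence contribution, in filter/map form.
def pvBlockB (ne s : List String) (e : List Int) : List (List Int) :=
  ((((PySem.List.enumerate ne 0).foldl
        (fun ps jt => ps.filter (fun p => PySem.List.pyGetD s (p + jt.1) "" == jt.2))
        (PySem.List.pyRange 0 ((s.length : Int) - (ne.length : Int) + 1) 1)).filter
      (fun p => decide (p + (ne.length : Int) ≤ (e.length : Int)))).map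
    (fun p => PySem.List.slice e (some p) (some (p + (ne.length : Int)))))

theorem pv_innerA_eq (ne s : List String) (e : List Int) (acc : List (List Int)) :
    (PySem.List.pyRange 0 ((s.length : Int) - (ne.length : Int) + 1) 1).foldl (fun acc2 i =>
      if PySem.List.slice s (some i) (some (i + (ne.length : Int))) == ne then
        let eeg := PySem.List.slice e (some i) (some (i + (ne.length : Int)))
        if (!(eeg == [])) && (eeg.length == ne.length) then acc2 ++ [eeg] else acc2
      else acc2) acc = acc ++ pvBlockA ne s e := by
  rw [PySem.List.foldl_congr_mem _ _
    (fun acc2 i =>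
      if ((PySem.List.slice s (some i) (some (i + (ne.length : Int))) == ne) &&
          ((!(PySem.List.slice e (some i) (some (i + (ne.length : Int))) == [])) &&
            ((PySem.List.slice e (some i) (some (i + (ne.length : Int)))).length == ne.length))) = true
      then acc2 ++ [PySem.List.slice e (some i) (some (i + (ne.length : Int)))] else acc2) _ ?_]
  · exact PySem.List.foldl_append_if _ _ _ _
  · intro acc2 i _
    by_cases h1 : (PySem.List.slice s (some i) (some (i + (ne.length : Int))) == ne) = true
    · by_cases h2 : ((!(PySem.List.slice e (some i) (some (i + (ne.length : Int))) == [])) &&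
        ((PySem.List.slice e (some i) (some (i + (ne.length : Int)))).length == ne.length)) = true <;>
        simp [h1, h2]
    · simp [h1]

theorem pv_A_eq (ne : List String) (ss : List (List String)) (es : List (List Int)) :
    is_named_entity_in_sentences ne ss es =
      (List.range ss.length).flatMap (fun k => pvBlockA ne (ss.getD k []) (es.getD k [])) := by
  unfold is_named_entity_in_sentences
  rw [PySem.List.foldl_congr_mem _ _
    (fun acc si => acc ++ pvBlockA ne (PySem.List.pyGetD ss si []) (PySem.List.pyGetD es si [])) _
    (fun acc si _ => pv_innerA_eq ne (PySem.List.pyGetD ss si []) (PySem.List.pyGetD es si []) acc)]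
  rw [PySem.List.foldl_append_eq_flatMap, PySem.List.pyRange_one, List.flatMap_map]
  simp [PySem.List.pyGetD_natCast]

-- composing filters is filtering by the conjunction
theorem pv_foldl_filter {α β : Type} (l : List β) (g : β → α → Bool) (xs : List α) :
    l.foldl (fun ps j => ps.filter (g j)) xs = xs.filter (fun x => l.all (fun j => g j x)) := by
  induction l generalizing xs with
  | nil => simp
  | cons j l ih =>
    rw [List.foldl_cons, ih, List.filter_filter]
    exact List.filter_congr (fun x _ => by rw [Bool.and_comm, List.all_cons])

theorem pv_B_eq (ne : List String) (ss : List (List String)) (es : List (List Int)) (hne : ne ≠ []) :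
    is_named_entity_in_sentences_alt ne ss es = (ss.zip es).flatMap (fun p => pvBlockB ne p.1 p.2) := by
  unfold is_named_entity_in_sentences_alt
  rw [if_neg (by simpa using hne)]
  refine Eq.trans (PySem.List.foldl_congr_mem _ _ (fun out se => out ++ pvBlockB ne se.1 se.2) _ ?_) ?_
  · intro out se _
    exact PySem.List.foldl_append_ite _ _ _ _
  · rw [PySem.List.foldl_append_eq_flatMap]
    simp

-- the two per-sentence blocks agree for a nonempty pattern
theorem pv_block_eq (ne s : List String) (e : List Int) (hne : ne ≠ []) :
    pvBlockA ne s e = pvBlockB ne s e := by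
  unfold pvBlockA pvBlockB
  rw [pv_foldl_filter, List.filter_filter]
  refine congrArg _ (List.filter_congr (fun q hq => ?_))
  rcases PySem.List.mem_pyRange_one.1 hq with ⟨hq0, hqlt⟩
  have hnl : 0 < ne.length := List.length_pos_iff.mpr hne
  have hqn : q.toNat + ne.length ≤ s.length := by omega
  have htn : (q + (ne.length : Int)).toNat - q.toNat = ne.length := by omega
  have hsl : PySem.List.slice s (some q) (some (q + (ne.length : Int))) =
      (s.drop q.toNat).take ne.length := by
    rw [PySem.List.slice_toNat s hq0 (by omega), htn]
  have hel : PySem.List.slice e (some q) (some (q + (ne.length : Int))) =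
      (e.drop q.toNat).take ne.length := by
    rw [PySem.List.slice_toNat e hq0 (by omega), htn]
  have hts : ((s.drop q.toNat).take ne.length).length = ne.length := by
    simp
    omega
  have hmid : ∀ (k : Nat) (_hk : k < ne.length),
      PySem.List.pyGetD s (q + ((0 : Int) + k)) "" = s[q.toNat + k]'(by omega) := by
    intro k hk
    have hb0 : (0 : Int) ≤ q + ((0 : Int) + k) := by omega
    have hb1 : q + ((0 : Int) + k) < (s.length : Int) := by omega
    rw [PySem.List.pyGetD_eq_getElem s "" hb0 hb1]
    congr 1
    omega
  have hmatch : (PySem.List.slice s (some q) (some (q + (ne.length : Int))) == ne) =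
      (PySem.List.enumerate ne 0).all (fun jt => PySem.List.pyGetD s (q + jt.1) "" == jt.2) := by
    apply Bool.coe_iff_coe.1
    rw [hsl, beq_iff_eq, List.all_eq_true]
    constructor
    · intro heq jt hjt
      rcases (PySem.List.mem_enumerate_iff ne 0 jt).1 hjt with ⟨k, hk, rfl⟩
      simp only [beq_iff_eq]
      rw [hmid k hk]
      have h4 : ((s.drop q.toNat).take ne.length)[k]'(by rw [hts]; exact hk) =
          s[q.toNat + k]'(by omega) := by
        simp [List.getElem_take, List.getElem_drop]
      exact h4.symm.trans (List.getElem_of_eq heq _)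
    · intro hall
      apply List.ext_getElem (by rw [hts])
      intro i h1 h2
      have hi : i < ne.length := h2
      have := hall ((0 : Int) + i, ne[i]) ((PySem.List.mem_enumerate_iff ne 0 _).2 ⟨i, hi, rfl⟩)
      simp only [beq_iff_eq] at this
      rw [hmid i hi] at this
      simpa [List.getElem_take, List.getElem_drop] using this
  have heeg : ((!(PySem.List.slice e (some q) (some (q + (ne.length : Int))) == [])) &&
      ((PySem.List.slice e (some q) (some (q + (ne.length : Int)))).length == ne.length)) =
      decide (q + (ne.length : Int) ≤ (e.length : Int)) := by
    rw [hel]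
    have hlt : ((e.drop q.toNat).take ne.length).length = min ne.length (e.length - q.toNat) := by
      simp
    by_cases hle : q.toNat + ne.length ≤ e.length
    · have h1 : ((e.drop q.toNat).take ne.length).length = ne.length := by omega
      have h2 : (e.drop q.toNat).take ne.length ≠ [] := by
        intro h
        rw [h] at h1
        simp at h1
        omega
      rw [decide_eq_true (show q + (ne.length : Int) ≤ (e.length : Int) by omega)]
      simp [h1, h2]
    · have h1 : ((e.drop q.toNat).take ne.length).length ≠ ne.length := by omega
      rw [decide_eq_false (show ¬ q + (ne.length : Int) ≤ (e.length : Int) by omega)]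
      have hb : (((e.drop q.toNat).take ne.length).length == ne.length) = false :=
        beq_eq_false_iff_ne.mpr h1
      rw [hb, Bool.and_false]
  rw [hmatch, heeg, Bool.and_comm]

-- A sentence beyond the end of embeddings contributes nothing (the slice of [] is []).
theorem pv_blockA_nil_emb (ne : List String) (s : List String) : pvBlockA ne s [] = [] := by
  unfold pvBlockA
  rw [List.filter_eq_nil_iff.2, List.map_nil]
  intro q hq
  rcases PySem.List.mem_pyRange_one.1 hq with ⟨hq0, _⟩
  rw [PySem.List.slice_toNat ([] : List Int) hq0 (by omega)]
  simp

theorem pv_blockA_nil_ne (s : List String) (e : List Int) : pvBlockA [] s e = [] := by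
  unfold pvBlockA
  rw [List.filter_eq_nil_iff.2, List.map_nil]
  intro q hq
  rcases PySem.List.mem_pyRange_one.1 hq with ⟨hq0, _⟩
  rw [PySem.List.slice_toNat e hq0 (by omega)]
  simp

-- index loop over getD with defaults = loop over the zip, when the default row yields nothing
theorem pv_flatMap_range_zip {α β γ : Type} (F : α → β → List γ) (d1 : α) (d2 : β)
    (ss : List α) (es : List β) (h : ∀ s, F s d2 = []) :
    (List.range ss.length).flatMap (fun k => F (ss.getD k d1) (es.getD k d2)) =
      (ss.zip es).flatMap (fun p => F p.1 p.2) := by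
  induction ss generalizing es with
  | nil => simp
  | cons s ss ih =>
    cases es with
    | nil => simp [List.range_succ_eq_map, List.flatMap_map, h]
    | cons e es =>
      rw [List.length_cons, List.range_succ_eq_map, List.flatMap_cons, List.flatMap_map]
      simp only [List.getD_cons_zero, List.getD_cons_succ]
      rw [ih es]
      rfl

-- ===== VERDICT (by name: the statement is the Claim_ definition above) =====
theorem is_named_entity_in_sentences_spec : Claim_equal_is_named_entity_in_sentences := by
  intro ne ss es _ hpre
  unfold Spec_is_named_entity_in_sentences
  by_cases hne : ne = []
  · subst hne
    rw [pv_A_eq]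
    simp [is_named_entity_in_sentences_alt, pv_blockA_nil_ne]
  · rw [pv_A_eq, pv_B_eq ne ss es hne,
      pv_flatMap_range_zip (fun s e => pvBlockA ne s e) [] [] ss es (pv_blockA_nil_emb ne)]
    exact List.flatMap_congr (fun p hp => pv_block_eq ne p.1 p.2 hne)
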